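-- pv_equiv track=rewrite | github.com/qjpike/AoC2025 | 2/2.py | compare_substrings
-- ===== SOURCE A (Python) =====
-- def compare_substrings(num, substr_len):
--     string = str(num)
--     if len(string) % substr_len != 0:
--         return 0
--
--     substrings = set()
--     last_i = 0
--     for i in range(substr_len, len(str(num)) + 1, substr_len):
--         substrings.add(string[last_i:i])
--         last_i = i
--     return num if len(substrings) == 1 else 0
-- ===== SOURCE B (Python) =====
-- def compare_substrings(num, substr_len):
--     string = str(num)
--     if len(string) % substr_len != 0:
--         return 0
--     k = len(string) // substr_len
--     return num if string == string[:substr_len] * k else 0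
-- ===== Notes on version B (the rewrite author's own statement) =====
-- stated objective: simpler
-- what changed: Replaces the loop that collects the chunks into a set and counts distinct ones by a single replicate-and-compare: string == string[:substr_len] * (len(string)//substr_len).
import Mathlib
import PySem

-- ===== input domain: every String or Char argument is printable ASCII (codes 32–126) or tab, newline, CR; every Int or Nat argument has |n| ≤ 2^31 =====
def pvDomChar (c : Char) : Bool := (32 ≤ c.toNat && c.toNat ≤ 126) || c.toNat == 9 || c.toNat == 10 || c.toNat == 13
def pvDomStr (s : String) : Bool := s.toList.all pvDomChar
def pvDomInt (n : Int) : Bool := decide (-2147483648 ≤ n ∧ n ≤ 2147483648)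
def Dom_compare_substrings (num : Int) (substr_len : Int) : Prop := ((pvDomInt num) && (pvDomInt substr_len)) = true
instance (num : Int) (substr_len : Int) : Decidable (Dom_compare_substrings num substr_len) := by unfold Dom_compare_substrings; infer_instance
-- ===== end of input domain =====

-- B replaces A's collect-distinct-chunks-into-a-set loop by a single replicate-and-compare
-- (string == string[:substr_len] * k); objective: simpler.

-- ===== PORT A =====
-- strings are ported as their code-point lists (PySem.Chars representation)
def compare_substrings (num : Int) (substr_len : Int) : Int :=
  let string := PySem.Int.toChars num
  if PySem.Int.mod (string.length : Int) substr_len ≠ 0 then 0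
  else
    let r := (PySem.List.pyRange substr_len (((PySem.Int.toChars num).length : Int) + 1) substr_len).foldl
      (fun (st : PySem.Set (List Char) × Int) i =>
        (PySem.Set.add st.1 (PySem.List.slice string (some st.2) (some i)), i))
      ((PySem.Set.empty : PySem.Set (List Char)), 0)
    if PySem.Set.len r.1 = 1 then num else 0

-- ===== PORT B =====
def compare_substrings_alt (num : Int) (substr_len : Int) : Int :=
  let string := PySem.Int.toChars num
  if PySem.Int.mod (string.length : Int) substr_len ≠ 0 then 0
  else
    let k := PySem.Int.floordiv (string.length : Int) substr_len
    -- string[:substr_len] * k : Python string repetition, exact (k ≤ 0 yields "")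
    if string = (List.replicate k.toNat (PySem.List.slice string none (some substr_len))).flatten
    then num else 0

-- ===== PRECONDITION & SPEC =====
-- Pre_ excludes substr_len = 0, where Python A raises ZeroDivisionError at `len(string) % substr_len`.
def Pre_compare_substrings (num : Int) (substr_len : Int) : Prop := substr_len ≠ 0
instance (num : Int) (substr_len : Int) : Decidable (Pre_compare_substrings num substr_len) := by unfold Pre_compare_substrings; infer_instance
def pvWitness_compare_substrings : Int × Int := (1212, 2)
def Spec_compare_substrings (num : Int) (substr_len : Int) (out : Int) : Prop := out = compare_substrings_alt num substr_len
instance (num : Int) (substr_len : Int) (out : Int) : Decidable (Spec_compare_substrings num substr_len out) := by unfold Spec_compare_substrings; infer_instance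

-- ===== CLAIM (what is proved, stated in full; the proofs are below) =====
def Claim_equal_compare_substrings : Prop := ∀ (num : Int) (substr_len : Int), Dom_compare_substrings num substr_len → Pre_compare_substrings num substr_len → Spec_compare_substrings num substr_len (compare_substrings num substr_len)

-- ===== LEMMAS AND PROOFS =====

-- str(num) is never the empty string
theorem pvToChars_ne_nil (n : Int) : PySem.Int.toChars n ≠ [] := by
  simp only [PySem.Int.toChars]
  split
  · simp
  · have : 0 < (Nat.toDigits 10 n.toNat).length := Nat.length_toDigits_pos
    intro h
    simp [h] at this

-- range(a, b, step) with a negative step and a ≤ b is empty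
theorem pvPyRange_neg_nil (a b s : Int) (hs : s < 0) (hab : a ≤ b) :
    PySem.List.pyRange a b s = [] := by
  simp only [PySem.List.pyRange]
  rw [if_neg (by omega), if_neg (by omega), if_neg (by omega)]
  simp

-- the successive chunks of size l, by structural recursion (proof-only helper)
def pvChunks (l : Nat) : Nat → List Char → List (List Char)
  | 0, _ => []
  | c + 1, s => s.take l :: pvChunks l c (s.drop l)

theorem pvChunks_length (l c : Nat) (s : List Char) : (pvChunks l c s).length = c := by
  induction c generalizing s with
  | zero => rfl
  | succ c ih => simp [pvChunks, ih]

theorem pvChunks_flatten (l c : Nat) (s : List Char) (h : s.length = c * l) :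
    (pvChunks l c s).flatten = s := by
  induction c generalizing s with
  | zero => simpa [pvChunks] using (List.length_eq_zero_iff.mp (by omega)).symm
  | succ c ih =>
    simp only [pvChunks, List.flatten_cons]
    rw [ih (s.drop l) (by simp [h, Nat.succ_mul]), List.take_append_drop]

theorem pvChunks_replicate (l c : Nat) (c0 : List Char) (hc0 : c0.length = l)
    (s : List Char) (h : s = (List.replicate c c0).flatten) :
    pvChunks l c s = List.replicate c c0 := by
  induction c generalizing s with
  | zero => simp [pvChunks]
  | succ c ih =>
    subst h
    simp only [List.replicate_succ, List.flatten_cons, pvChunks]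
    rw [List.take_left' hc0, List.drop_left' hc0, ih _ rfl]

-- the mapped index form of the chunk list equals pvChunks
theorem pvChunks_eq_map (l : Nat) (s : List Char) :
    ∀ (c m : Nat), (List.range' m c).map (fun j => (s.drop (j * l)).take l) =
      pvChunks l c (s.drop (m * l)) := by
  intro c
  induction c with
  | zero => intro m; rfl
  | succ c ih =>
    intro m
    simp only [List.range'_succ, List.map_cons, pvChunks]
    have hd : m * l + l = (m + 1) * l := by ring
    rw [ih (m + 1), List.drop_drop, hd]
theorem pvChunks_eq_map' (l : Nat) (s : List Char) (c : Nat) :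
    (List.range' 0 c).map (fun j => (s.drop (j * l)).take l) = pvChunks l c s := by
  simpa using pvChunks_eq_map l s c 0

-- A's loop: folding the slice-and-add step over the chunk boundaries builds the set of chunks
theorem pvFold_chunks (s : List Char) (l : Nat) :
    ∀ (c m : Nat) (S : PySem.Set (List Char)),
    ((List.range' m c).map (fun t => (((t + 1) * l : Nat) : Int))).foldl
      (fun (st : PySem.Set (List Char) × Int) i =>
        (PySem.Set.add st.1 (PySem.List.slice s (some st.2) (some i)), i))
      (S, ((m * l : Nat) : Int))
    = (PySem.Set.update S ((List.range' m c).map (fun j => (s.drop (j * l)).take l)),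
       (((m + c) * l : Nat) : Int)) := by
  intro c
  induction c with
  | zero => intro m S; rfl
  | succ c ih =>
    intro m S
    simp only [List.range'_succ, List.map_cons, List.foldl_cons]
    rw [PySem.List.slice_natCast s (m * l) ((m + 1) * l)]
    have harith : (m + 1) * l - m * l = l := by simp [Nat.succ_mul]
    have hmc : m + 1 + c = m + (c + 1) := by omega
    rw [harith, ih (m + 1), hmc]
    rfl

-- a deduplicated list has one element iff all elements agree with a given member
theorem pvOfList_len_one (l : List (List Char)) (c : List Char) (hc : c ∈ l) :
    ((PySem.Set.ofList l).length = 1 ↔ ∀ x ∈ l, x = c) := by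
  rw [← PySem.List.dedup_eq_ofList]
  constructor
  · intro h1 x hx
    obtain ⟨a, ha⟩ := List.length_eq_one_iff.mp h1
    have hxa : x = a := by
      have h2 := (PySem.List.mem_dedup l x).mpr hx
      rw [ha] at h2
      simpa using h2
    have hh : c = a := by
      have h2 := (PySem.List.mem_dedup l c).mpr hc
      rw [ha] at h2
      simpa using h2
    rw [hxa, hh]
  · intro hall
    have hnd := PySem.List.nodup_dedup l
    have hmem : ∀ x ∈ PySem.List.dedup l, x = c := by
      intro x hx
      exact hall x ((PySem.List.mem_dedup l x).mp hx)
    have hne' : PySem.List.dedup l ≠ [] := by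
      intro h
      have h2 := (PySem.List.mem_dedup l c).mpr hc
      rw [h] at h2
      simp at h2
    match hd : PySem.List.dedup l with
    | [] => exact absurd hd hne'
    | b :: t =>
      rw [hd] at hnd hmem
      have hb : b = c := hmem b (by simp)
      have ht : t = [] := by
        by_contra htne
        have hth : t.head htne ∈ b :: t := by
          simp [List.head_mem htne]
        have h3 := hmem _ hth
        have hbt : b ∉ t := (List.nodup_cons.mp hnd).1
        rw [hb, ← h3] at hbt
        exact hbt (List.head_mem htne)
      simp [ht]

-- ===== VERDICT (by name: the statement is the Claim_ definition above) =====
theorem compare_substrings_spec : Claim_equal_compare_substrings := by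
  intro num L _ hL
  unfold Spec_compare_substrings compare_substrings compare_substrings_alt
  dsimp only
  set s := PySem.Int.toChars num with hs
  by_cases hm : PySem.Int.mod (s.length : Int) L = 0
  · simp only [if_neg (not_not_intro hm)]
    have hdvd : L ∣ (s.length : Int) := (PySem.Int.mod_eq_zero_iff_dvd _ _).mp hm
    have hsne : s ≠ [] := pvToChars_ne_nil num
    have hlen : 0 < s.length := List.length_pos_iff.mpr hsne
    rcases lt_trichotomy L 0 with hLneg | hL0 | hLpos
    · -- negative substr_len: A's range is empty, B's replication count is ≤ 0
      rw [pvPyRange_neg_nil _ _ _ hLneg (by omega)]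
      have hk : PySem.Int.floordiv (s.length : Int) L < 0 := by
        have hmod := PySem.Int.floordiv_mul_add_mod (s.length : Int) L
        rw [hm, add_zero] at hmod
        nlinarith [hmod, (by exact_mod_cast hlen : (0:Int) < (s.length : Int))]
      rw [Int.toNat_of_nonpos (le_of_lt hk)]
      simp only [List.replicate_zero, List.flatten_nil, List.foldl_nil]
      rw [if_neg (by simp [PySem.Set.len, PySem.Set.empty]), if_neg hsne]
    · exact absurd hL0 hL
    · -- positive substr_len dividing the length
      obtain ⟨l, hl, rfl⟩ : ∃ l : Nat, 0 < l ∧ L = (l : Int) :=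
        ⟨L.toNat, by omega, by omega⟩
      have hlZ : (0:Int) < (l : Int) := by exact_mod_cast hl
      obtain ⟨k, hk⟩ : ∃ k : Nat, s.length = k * l := by
        obtain ⟨q, hq⟩ := hdvd
        exact ⟨q.toNat, by nlinarith [Int.toNat_of_nonneg (show (0:Int) ≤ q by nlinarith), hq]⟩
      have hkpos : 0 < k := by
        rcases Nat.eq_zero_or_pos k with h0 | h
        · subst h0; rw [Nat.zero_mul] at hk; omega
        · exact h
      have hlk : l ≤ k * l := Nat.le_mul_of_pos_left l hkpos
      -- evaluate A's range
      have hrange : PySem.List.pyRange (l : Int) ((s.length : Int) + 1) (l : Int) =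
          (List.range' 0 k).map (fun t => (((t + 1) * l : Nat) : Int)) := by
        rw [PySem.List.pyRange_of_pos _ _ hlZ]
        rw [if_pos (by rw [hk]; exact_mod_cast Nat.lt_succ_of_le hlk)]
        have hcnt : (((s.length : Int) + 1 - l + l - 1) / l).toNat = k := by
          have h1 : ((s.length : Int) + 1 - l + l - 1) = (k : Int) * l := by
            rw [hk]; push_cast; ring
          rw [h1, Int.mul_ediv_cancel _ hlZ.ne']
          simp
        rw [hcnt, List.range_eq_range']
        apply List.map_congr_left
        intro t _
        push_cast; ring
      rw [hrange]
      have hfold := pvFold_chunks s l k 0 (PySem.Set.empty : PySem.Set (List Char))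
      simp only [Nat.zero_mul, Nat.cast_zero] at hfold
      rw [hfold]
      set chunks := (List.range' 0 k).map (fun j => (s.drop (j * l)).take l) with hch
      have hchunks : chunks = pvChunks l k s := by
        rw [hch, pvChunks_eq_map']
      have hmemc : s.take l ∈ chunks := by
        rw [hchunks]
        cases k with
        | zero => omega
        | succ k => exact List.mem_cons_self
      have hupdate : PySem.Set.update (PySem.Set.empty : PySem.Set (List Char)) chunks =
          PySem.Set.ofList chunks := rfl
      rw [hupdate]
      have hfirstlen : (s.take l).length = l := by
        rw [List.length_take, hk]
        exact Nat.min_eq_left hlk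
      -- B's side
      have hkB : PySem.Int.floordiv (s.length : Int) (l : Int) = (k : Int) := by
        rw [hk]
        push_cast
        rw [PySem.Int.floordiv_eq_ediv_of_pos hlZ]
        exact Int.mul_ediv_cancel _ hlZ.ne'
      have hslice : PySem.List.slice s none (some (l : Int)) = s.take l :=
        PySem.List.slice_to_natCast s l
      rw [hkB, hslice]
      simp only [Int.toNat_natCast]
      -- equate the two conditions
      have hcond : ((PySem.Set.ofList chunks).length = 1) ↔
          (s = (List.replicate k (s.take l)).flatten) := by
        rw [pvOfList_len_one chunks (s.take l) hmemc]
        constructor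
        · intro hall
          have hrep : chunks = List.replicate k (s.take l) := by
            apply List.eq_replicate_iff.mpr
            refine ⟨by rw [hchunks, pvChunks_length], hall⟩
          rw [← hrep, hchunks, pvChunks_flatten l k s hk]
        · intro hrep x hx
          have h2 := pvChunks_replicate l k (s.take l) hfirstlen s hrep
          rw [hchunks, h2] at hx
          exact List.eq_of_mem_replicate hx
      by_cases hA : (PySem.Set.len (PySem.Set.ofList chunks) : Int) = 1
      · have h1 : (PySem.Set.ofList chunks).length = 1 := by
          simpa [PySem.Set.len] using hA
        rw [if_pos hA, if_pos (hcond.mp h1)]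
      · have h1 : ¬ (PySem.Set.ofList chunks).length = 1 := by
          intro h; exact hA (by simp [PySem.Set.len, h])
        rw [if_neg hA, if_neg (fun h => h1 (hcond.mpr h))]
  · simp only [if_pos hm]
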